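-- pv_equiv track=rewrite | github.com/kupl/PyTER | my_tool/synthesizer/extract_info.py | compare_args
-- ===== SOURCE A (Python) =====
-- def compare_args(pos_args_list, neg_args) :
--     var_candidates = dict()
--     for neg_arg, neg_typ in neg_args.items() :
--         typs = dict()
--         for pos_args in pos_args_list :
--             for pos_arg, pos_typ in pos_args.items() :
--                 if pos_arg == neg_arg and pos_typ != neg_typ :
--                     typs[neg_typ] = typs.get(neg_typ, 0) + 1
--
--         if typs :
--             var_candidates[neg_arg] = typs
--
--     return var_candidates
-- ===== SOURCE B (Python) =====
-- def compare_args(pos_args_list, neg_args):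
--     counts = {}
--     for pos_args in pos_args_list:
--         for name, typ in pos_args.items():
--             if neg_args.get(name, typ) != typ:
--                 counts[name] = counts.get(name, 0) + 1
--     return {name: {typ: counts[name]}
--             for name, typ in neg_args.items() if counts.get(name, 0) > 0}
-- ===== Notes on version B (the rewrite author's own statement) =====
-- stated objective: faster
-- what changed: Instead of rescanning all of pos_args_list once per neg_args entry, B makes a single pass over pos_args_list accumulating a per-name counter (counting items whose name is a neg_args key with a differing type), then builds the result in one walk over neg_args.items().
import Mathlib
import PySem

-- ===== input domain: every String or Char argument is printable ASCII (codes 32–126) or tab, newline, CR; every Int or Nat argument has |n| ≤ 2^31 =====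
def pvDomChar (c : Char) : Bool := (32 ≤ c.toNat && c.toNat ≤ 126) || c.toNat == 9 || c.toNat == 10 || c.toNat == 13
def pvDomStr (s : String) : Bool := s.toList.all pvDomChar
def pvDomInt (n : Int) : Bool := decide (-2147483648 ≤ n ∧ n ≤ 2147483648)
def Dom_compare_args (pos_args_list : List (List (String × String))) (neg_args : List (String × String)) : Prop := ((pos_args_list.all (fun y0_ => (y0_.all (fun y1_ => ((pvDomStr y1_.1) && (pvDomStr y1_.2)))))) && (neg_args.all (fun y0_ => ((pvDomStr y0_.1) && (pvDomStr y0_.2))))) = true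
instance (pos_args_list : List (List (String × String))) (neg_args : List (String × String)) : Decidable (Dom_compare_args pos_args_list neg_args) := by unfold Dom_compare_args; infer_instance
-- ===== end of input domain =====

-- B makes one counting pass over pos_args_list instead of one per neg_args entry (objective: faster).

-- ===== PORT A =====
-- literal port of A: for each neg item, rescan all pos dicts counting name-matching
-- entries of differing type into typs (a dict that only ever holds key neg_typ),
-- and record nonempty typs under neg_arg (nested dicts encoded as item lists).
def compare_args (pos_args_list : List (List (String × String))) (neg_args : List (String × String)) : List (String × List (String × Int)) :=
  let var_candidates : PySem.Dict String (List (String × Int)) :=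
    (PySem.Dict.ofList neg_args).items.foldl (fun vc ng =>
      let typs : PySem.Dict String Int :=
        pos_args_list.foldl (fun typs pos_args =>
          (PySem.Dict.ofList pos_args).items.foldl (fun typs ps =>
            if ps.1 == ng.1 && ps.2 != ng.2 then typs.modify ng.2 0 (· + 1) else typs) typs)
          PySem.Dict.empty
      if typs.size != 0 then vc.insert ng.1 typs.items else vc)
      PySem.Dict.empty
  var_candidates.items

-- ===== PORT B =====
-- literal port of B (Source B): one pass filling counts, then one walk over neg_args' items.
def compare_args_alt (pos_args_list : List (List (String × String))) (neg_args : List (String × String)) : List (String × List (String × Int)) :=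
  let negD := PySem.Dict.ofList neg_args
  let counts : PySem.Dict String Int :=
    pos_args_list.foldl (fun counts pos_args =>
      (PySem.Dict.ofList pos_args).items.foldl (fun counts nt =>
        if negD.getD nt.1 nt.2 != nt.2 then counts.modify nt.1 0 (· + 1) else counts) counts)
      PySem.Dict.empty
  let res : PySem.Dict String (List (String × Int)) :=
    negD.items.foldl (fun vc nt =>
      if counts.getD nt.1 0 > 0 then vc.insert nt.1 [(nt.2, counts.getD nt.1 0)] else vc)
      PySem.Dict.empty
  res.items

-- ===== PRECONDITION & SPEC =====
def Spec_compare_args (pos_args_list : List (List (String × String))) (neg_args : List (String × String)) (out : List (String × List (String × Int))) : Prop := out = compare_args_alt pos_args_list neg_args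
instance (pos_args_list : List (List (String × String))) (neg_args : List (String × String)) (out : List (String × List (String × Int))) : Decidable (Spec_compare_args pos_args_list neg_args out) := by unfold Spec_compare_args; infer_instance

-- ===== CLAIM (what is proved, stated in full; the proofs are below) =====
def Claim_equal_compare_args : Prop := ∀ (pos_args_list : List (List (String × String))) (neg_args : List (String × String)), Dom_compare_args pos_args_list neg_args → Spec_compare_args pos_args_list neg_args (compare_args pos_args_list neg_args)

-- ===== LEMMAS AND PROOFS =====

def typsState (t : String) (c : Nat) : PySem.Dict String Int :=
  if c = 0 then PySem.Dict.empty else PySem.Dict.mk [(t, (c : Int))]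

theorem typsState_modify (t : String) (c : Nat) :
    (typsState t c).modify t 0 (· + 1) = typsState t (c + 1) := by
  cases c with
  | zero => simp [typsState, PySem.Dict.modify, PySem.Dict.insert, PySem.Dict.getD,
      PySem.Dict.get?, PySem.Dict.contains, PySem.Dict.empty]
  | succ k =>
      simp [typsState, PySem.Dict.modify, PySem.Dict.insert, PySem.Dict.getD,
        PySem.Dict.get?, PySem.Dict.contains]

theorem foldl_typs (n t : String) :
    ∀ (L : List (String × String)) (c : Nat),
      L.foldl (fun typs ps =>
          if ps.1 == n && ps.2 != t then typs.modify t 0 (· + 1) else typs) (typsState t c)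
        = typsState t (c + L.countP (fun ps => ps.1 == n && ps.2 != t)) := by
  intro L
  induction L with
  | nil => intro c; simp
  | cons a L ih =>
    intro c
    by_cases h : (a.1 == n && a.2 != t) = true
    · simp only [List.foldl_cons, List.countP_cons, h, if_true]
      rw [typsState_modify, ih (c + 1)]
      congr 1
      omega
    · simp only [List.foldl_cons, List.countP_cons, h]
      rw [if_neg (by simp), ih c]
      simp

theorem foldl_counts_getD (g : String × String → Bool) :
    ∀ (L : List (String × String)) (d : PySem.Dict String Int) (n : String),
      (L.foldl (fun counts nt =>
          if g nt then counts.modify nt.1 0 (· + 1) else counts) d).getD n 0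
        = d.getD n 0 + (L.countP (fun nt => nt.1 == n && g nt) : Int) := by
  intro L
  induction L with
  | nil => intro d n; simp
  | cons a L ih =>
    intro d n
    by_cases hg : g a = true
    · simp only [List.foldl_cons, List.countP_cons, hg, if_true]
      rw [ih]
      by_cases hn : a.1 = n
      · subst hn
        rw [PySem.Dict.getD_modify_self]
        simp
        ring
      · rw [PySem.Dict.getD_modify_of_ne _ _ _ (by exact fun h => hn h.symm)]
        simp [hn]
    · simp only [List.foldl_cons, List.countP_cons, hg]
      rw [ih]
      simp

theorem items_foldl_insertIf {ν : Type} (c : String × String → Prop) [DecidablePred c] (v : String × String → ν) :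
    ∀ (l : List (String × String)) (d : PySem.Dict String ν),
      (∀ a ∈ l, d.contains a.1 = false) → (l.map (·.1)).Nodup →
      (l.foldl (fun vc a => if c a then vc.insert a.1 (v a) else vc) d).items
        = d.items ++ l.filterMap (fun a => if c a then some (a.1, v a) else none) := by
  intro l
  induction l with
  | nil => intro d _ _; simp
  | cons a l ih =>
    intro d hfresh hnodup
    simp only [List.map_cons, List.nodup_cons] at hnodup
    by_cases hc : c a
    · simp only [List.foldl_cons, List.filterMap_cons, if_pos hc]
      rw [ih (d.insert a.1 (v a))
          (by intro b hb
              rw [PySem.Dict.contains_insert]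
              have : ¬ (b.1 = a.1) := by
                intro he; exact hnodup.1 (he ▸ List.mem_map_of_mem hb)
              simp [this, hfresh b (List.mem_cons_of_mem _ hb)])
          hnodup.2]
      rw [PySem.Dict.items_insert_of_not_contains _ _ (hfresh a (List.mem_cons_self))]
      simp
    · simp only [List.foldl_cons, List.filterMap_cons, if_neg hc]
      exact ih d (fun b hb => hfresh b (List.mem_cons_of_mem _ hb)) hnodup.2

set_option maxHeartbeats 1000000 in
theorem main_eq (pos_args_list : List (List (String × String))) (neg_args : List (String × String)) :
    compare_args pos_args_list neg_args = compare_args_alt pos_args_list neg_args := by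
  set N := PySem.Dict.ofList neg_args with hN
  set Lflat := (pos_args_list.map (fun pa => (PySem.Dict.ofList pa).items)).flatten with hL
  have hkeysnd : (N.items.map (·.1)).Nodup := by
    have := PySem.Dict.nodup_keys_ofList (κ := String) (ν := String) neg_args
    simpa [PySem.Dict.keys, hN] using this
  -- A as a filterMap
  have hA : compare_args pos_args_list neg_args
      = N.items.filterMap (fun ng =>
          let T := Lflat.foldl (fun typs ps =>
            if ps.1 == ng.1 && ps.2 != ng.2 then typs.modify ng.2 0 (· + 1) else typs)
            (PySem.Dict.empty : PySem.Dict String Int)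
          if T.size != 0 then some (ng.1, T.items) else none) := by
    have step : compare_args pos_args_list neg_args
        = (N.items.foldl (fun vc ng =>
            if (Lflat.foldl (fun typs ps =>
                if ps.1 == ng.1 && ps.2 != ng.2 then typs.modify ng.2 0 (· + 1) else typs)
                (PySem.Dict.empty : PySem.Dict String Int)).size != 0
            then vc.insert ng.1 (Lflat.foldl (fun typs ps =>
                if ps.1 == ng.1 && ps.2 != ng.2 then typs.modify ng.2 0 (· + 1) else typs)
                (PySem.Dict.empty : PySem.Dict String Int)).items
            else vc) PySem.Dict.empty).items := by
      simp only [compare_args, hN, hL, List.foldl_flatten, List.foldl_map]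
    rw [step, items_foldl_insertIf _ _ N.items PySem.Dict.empty
        (fun a _ => PySem.Dict.contains_empty a.1) hkeysnd]
    simp [PySem.Dict.empty]
  -- B as a filterMap
  have hB : compare_args_alt pos_args_list neg_args
      = N.items.filterMap (fun nt =>
          let counts := Lflat.foldl (fun counts nt' =>
            if N.getD nt'.1 nt'.2 != nt'.2 then counts.modify nt'.1 0 (· + 1) else counts)
            (PySem.Dict.empty : PySem.Dict String Int)
          if counts.getD nt.1 0 > 0 then some (nt.1, [(nt.2, counts.getD nt.1 0)]) else none) := by
    have step : compare_args_alt pos_args_list neg_args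
        = (N.items.foldl (fun vc nt =>
            if (Lflat.foldl (fun counts nt' =>
                if N.getD nt'.1 nt'.2 != nt'.2 then counts.modify nt'.1 0 (· + 1) else counts)
                (PySem.Dict.empty : PySem.Dict String Int)).getD nt.1 0 > 0
            then vc.insert nt.1 [(nt.2, (Lflat.foldl (fun counts nt' =>
                if N.getD nt'.1 nt'.2 != nt'.2 then counts.modify nt'.1 0 (· + 1) else counts)
                (PySem.Dict.empty : PySem.Dict String Int)).getD nt.1 0)]
            else vc) PySem.Dict.empty).items := by
      simp only [compare_args_alt, hN, hL, List.foldl_flatten, List.foldl_map]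
    rw [step, items_foldl_insertIf _ _ N.items PySem.Dict.empty
        (fun a _ => PySem.Dict.contains_empty a.1) hkeysnd]
    simp [PySem.Dict.empty]
  rw [hA, hB]
  apply List.filterMap_congr
  intro a ha
  have hget : N.get? a.1 = some a.2 := by
    refine PySem.Dict.get?_of_mem_items N ?_ ?_
    · exact ha
    · simpa [PySem.Dict.keys] using hkeysnd
  have hcnt : Lflat.countP (fun nt => nt.1 == a.1 && (N.getD nt.1 nt.2 != nt.2))
      = Lflat.countP (fun ps => ps.1 == a.1 && ps.2 != a.2) := by
    apply List.countP_congr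
    intro x _
    by_cases hx : x.1 = a.1
    · have hgd : N.getD a.1 x.2 = a.2 := PySem.Dict.getD_of_get?_eq_some N x.2 hget
      simp [hx, hgd]
      exact not_congr ⟨Eq.symm, Eq.symm⟩
    · simp [hx]
  have hTs : Lflat.foldl (fun typs ps =>
        if ps.1 == a.1 && ps.2 != a.2 then typs.modify a.2 0 (· + 1) else typs) PySem.Dict.empty
      = typsState a.2 (Lflat.countP (fun ps => ps.1 == a.1 && ps.2 != a.2)) := by
    have h := foldl_typs a.1 a.2 Lflat 0
    rw [Nat.zero_add] at h
    exact h
  have hCg : (Lflat.foldl (fun counts nt' =>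
        if N.getD nt'.1 nt'.2 != nt'.2 then counts.modify nt'.1 0 (· + 1) else counts)
        PySem.Dict.empty).getD a.1 0
      = (Lflat.countP (fun ps => ps.1 == a.1 && ps.2 != a.2) : Int) := by
    rw [foldl_counts_getD (fun nt' => N.getD nt'.1 nt'.2 != nt'.2) Lflat PySem.Dict.empty a.1]
    rw [PySem.Dict.getD_empty]
    rw [hcnt]
    ring
  simp only [hTs, hCg]
  set c := Lflat.countP (fun ps => ps.1 == a.1 && ps.2 != a.2) with hc
  by_cases h0 : c = 0
  · simp [h0, typsState]
  · have hpos : (0:Int) < (c:Int) := by exact_mod_cast Nat.pos_of_ne_zero h0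
    simp [typsState, h0, PySem.Dict.size]

-- ===== VERDICT (by name: the statement is the Claim_ definition above) =====
theorem compare_args_spec : Claim_equal_compare_args := by
  intro pos_args_list neg_args _
  exact main_eq pos_args_list neg_args
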